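-- pv_equiv track=rewrite | github.com/GeekStories/notechart | notechart/core.py | segment_notes
-- ===== SOURCE A (Python) =====
-- def segment_notes(times, pitches):
--     notes = []
--     current_pitch = None
--     start_time = None
--     for t, p in zip(times, pitches):
--         if p is None:
--             if current_pitch is not None:
--                 notes.append({"start": start_time, "end": t, "pitch": current_pitch})
--                 current_pitch = None
--             continue
--         if current_pitch is None:
--             current_pitch = p
--             start_time = t
--         elif p != current_pitch:
--             notes.append({"start": start_time, "end": t, "pitch": current_pitch})
--             current_pitch = p
--             start_time = t
--     if current_pitch is not None:
--         notes.append({"start": start_time, "end": times[-1], "pitch": current_pitch})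
--     return notes
-- ===== SOURCE B (Python) =====
-- def segment_notes(times, pitches):
--     pairs = list(zip(times, pitches))
--     last = times[-1] if times else None
--     notes = []
--     i = 0
--     n = len(pairs)
--     while i < n:
--         t0, p0 = pairs[i]
--         j = i + 1
--         while j < n and pairs[j][1] == p0:
--             j += 1
--         if p0 is not None:
--             end = pairs[j][0] if j < n else last
--             notes.append({"start": t0, "end": end, "pitch": p0})
--         i = j
--     return notes
-- ===== Notes on version B (the rewrite author's own statement) =====
-- stated objective: alternative
-- what changed: Replaces A's single-pass state machine (current_pitch/start_time variables mutated across the loop) with run-splitting: an outer loop that finds each maximal run of equal pitch with an inner scan over the zipped pairs and reads the run's end time from the element just past the run (or times[-1] at the end).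
import Mathlib
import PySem

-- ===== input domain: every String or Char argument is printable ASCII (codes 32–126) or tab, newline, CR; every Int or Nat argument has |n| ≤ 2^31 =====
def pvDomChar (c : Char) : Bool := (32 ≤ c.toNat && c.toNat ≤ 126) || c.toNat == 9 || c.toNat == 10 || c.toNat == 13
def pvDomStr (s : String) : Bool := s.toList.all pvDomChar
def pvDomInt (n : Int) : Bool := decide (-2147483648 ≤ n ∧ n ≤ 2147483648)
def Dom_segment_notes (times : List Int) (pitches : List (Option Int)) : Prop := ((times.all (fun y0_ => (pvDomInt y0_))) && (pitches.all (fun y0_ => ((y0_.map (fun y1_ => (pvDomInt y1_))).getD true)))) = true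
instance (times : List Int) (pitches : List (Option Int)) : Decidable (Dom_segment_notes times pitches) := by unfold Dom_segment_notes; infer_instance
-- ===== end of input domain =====

-- B replaces A's current_pitch/start_time state machine by run-splitting (inner scan per
-- maximal equal-pitch run, end time read from the element past the run); alternative, not faster.


-- ===== PORT A =====
-- loop body of A; state = (notes, current_pitch, start_time), branches in Python's order.
-- start_time is only read when current_pitch is set (then it has been assigned), so `.getD 0` is unreachable.
def stepA (st : List (List (String × Int)) × Option Int × Option Int)
    (tp : Int × Option Int) : List (List (String × Int)) × Option Int × Option Int :=
  match st, tp with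
  | (notes, none, start), (_, none) => (notes, none, start)
  | (notes, some c, start), (t, none) =>
      (notes ++ [[("start", start.getD 0), ("end", t), ("pitch", c)]], none, start)
  | (notes, none, _), (t, some q) => (notes, some q, some t)
  | (notes, some c, start), (t, some q) =>
      if q ≠ c then
        (notes ++ [[("start", start.getD 0), ("end", t), ("pitch", c)]], some q, some t)
      else (notes, some c, start)

def segment_notes (times : List Int) (pitches : List (Option Int)) : List (List (String × Int)) :=
  match (List.zip times pitches).foldl stepA ([], none, none) with
  | (notes, some c, start) =>
      -- times[-1]: reached only with a run open, hence times ≠ [], so pyGet? is some and `.getD 0` unreachable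
      notes ++ [[("start", start.getD 0), ("end", (PySem.List.pyGet? times (-1)).getD 0), ("pitch", c)]]
  | (notes, none, _) => notes

-- ===== PORT B =====
-- inner while loop of B: length of the maximal prefix of pairs whose pitch equals p0
def runLen (p0 : Option Int) : List (Int × Option Int) → Nat
  | [] => 0
  | (_, p) :: rest => if p = p0 then runLen p0 rest + 1 else 0

-- outer while loop of B over the suffix of pairs starting at index i
def altGo (lastT : Int) : List (Int × Option Int) → List (List (String × Int))
  | [] => []
  | (t0, p0) :: rest =>
    let rest' := rest.drop (runLen p0 rest)
    match p0 with
    | none => altGo lastT rest'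
    | some q =>
      [("start", t0),
       ("end", match rest'.head? with | some (t, _) => t | none => lastT),
       ("pitch", q)] :: altGo lastT rest'
  termination_by l => l.length
  decreasing_by all_goals (simp [List.length_drop]; try omega)

def segment_notes_alt (times : List Int) (pitches : List (Option Int)) : List (List (String × Int)) :=
  -- last = times[-1] if times else None: only read when a run exists, hence times ≠ []; `.getD 0` unreachable
  altGo ((PySem.List.pyGet? times (-1)).getD 0) (List.zip times pitches)

-- ===== PRECONDITION & SPEC =====
def Spec_segment_notes (times : List Int) (pitches : List (Option Int)) (out : List (List (String × Int))) : Prop := out = segment_notes_alt times pitches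
instance (times : List Int) (pitches : List (Option Int)) (out : List (List (String × Int))) : Decidable (Spec_segment_notes times pitches out) := by unfold Spec_segment_notes; infer_instance

-- ===== CLAIM (what is proved, stated in full; the proofs are below) =====
def Claim_equal_segment_notes : Prop := ∀ (times : List Int) (pitches : List (Option Int)), Dom_segment_notes times pitches → Spec_segment_notes times pitches (segment_notes times pitches)

-- ===== LEMMAS AND PROOFS =====

-- A's final if-statement as a function of the fold state
def finishA (lastT : Int) : List (List (String × Int)) × Option Int × Option Int → List (List (String × Int))
  | (notes, some c, start) => notes ++ [[("start", start.getD 0), ("end", lastT), ("pitch", c)]]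
  | (notes, none, _) => notes

-- the end-time B assigns to a run whose remainder is rest'
def endOf (lastT : Int) (rest' : List (Int × Option Int)) : Int :=
  match rest'.head? with | some (t, _) => t | none => lastT

lemma altGo_nil (lastT : Int) : altGo lastT [] = [] := by rw [altGo]

lemma altGo_cons_none (lastT t : Int) (rest : List (Int × Option Int)) :
    altGo lastT ((t, none) :: rest) = altGo lastT (rest.drop (runLen none rest)) := by
  rw [altGo]

lemma altGo_cons_some (lastT t q : Int) (rest : List (Int × Option Int)) :
    altGo lastT ((t, some q) :: rest) =
      [("start", t), ("end", endOf lastT (rest.drop (runLen (some q) rest))), ("pitch", q)]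
        :: altGo lastT (rest.drop (runLen (some q) rest)) := by
  rw [altGo]; rfl

lemma altGo_skip_none (lastT : Int) :
    ∀ l : List (Int × Option Int), altGo lastT (l.drop (runLen none l)) = altGo lastT l := by
  intro l
  induction l with
  | nil => simp [runLen]
  | cons hd tl ih =>
    obtain ⟨t, p⟩ := hd
    cases p with
    | none =>
      rw [altGo_cons_none]
      have h1 : runLen none ((t, none) :: tl) = runLen none tl + 1 := by simp [runLen]
      rw [h1, List.drop_succ_cons]
    | some q => simp [runLen]

lemma fold_main (lastT : Int) :
    ∀ l : List (Int × Option Int),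
      (∀ notes s, finishA lastT (l.foldl stepA (notes, none, s)) = notes ++ altGo lastT l) ∧
      (∀ notes c t0,
        finishA lastT (l.foldl stepA (notes, some c, some t0)) =
          notes ++ [("start", t0), ("end", endOf lastT (l.drop (runLen (some c) l))), ("pitch", c)]
            :: altGo lastT (l.drop (runLen (some c) l))) := by
  intro l
  induction l with
  | nil =>
    refine ⟨fun notes s => ?_, fun notes c t0 => ?_⟩
    · simp [finishA, altGo_nil]
    · simp [finishA, runLen, endOf, altGo_nil]
  | cons hd tl ih =>
    obtain ⟨t, p⟩ := hd
    refine ⟨fun notes s => ?_, fun notes c t0 => ?_⟩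
    · cases p with
      | none =>
        simp only [List.foldl_cons, stepA]
        rw [ih.1, altGo_cons_none, altGo_skip_none]
      | some q =>
        simp only [List.foldl_cons, stepA]
        rw [ih.2, altGo_cons_some]
    · cases p with
      | none =>
        simp only [List.foldl_cons, stepA]
        rw [ih.1]
        have h0 : runLen (some c) ((t, none) :: tl) = 0 := by simp [runLen]
        rw [h0, List.drop_zero, altGo_cons_none, altGo_skip_none]
        simp [endOf]
      | some q =>
        by_cases hq : q = c
        · subst hq
          simp only [List.foldl_cons, stepA, ne_eq, not_true_eq_false, if_neg, not_false_eq_true]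
          rw [ih.2]
          simp [runLen]
        · simp only [List.foldl_cons, stepA, if_pos (by simpa using hq)]
          rw [ih.2]
          have h0 : runLen (some c) ((t, some q) :: tl) = 0 := by simp [runLen, hq]
          rw [h0, List.drop_zero, altGo_cons_some]
          simp [endOf]

lemma segment_notes_eq_finish (times : List Int) (pitches : List (Option Int)) :
    segment_notes times pitches =
      finishA ((PySem.List.pyGet? times (-1)).getD 0)
        ((List.zip times pitches).foldl stepA ([], none, none)) := by
  unfold segment_notes finishA
  rcases (List.zip times pitches).foldl stepA ([], none, none) with ⟨notes, cur, start⟩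
  cases cur <;> rfl

-- ===== VERDICT (by name: the statement is the Claim_ definition above) =====
theorem segment_notes_spec : Claim_equal_segment_notes := by
  intro times pitches _
  unfold Spec_segment_notes segment_notes_alt
  rw [segment_notes_eq_finish]
  rw [(fold_main _ (List.zip times pitches)).1 [] none]
  simp
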